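-- pv_equiv track=rewrite | github.com/devboy/requencer | hardware/boards/scripts/placer/connectivity.py | compute_wave_distances
-- ===== SOURCE A (Python) =====
-- from collections import defaultdict
--
-- def compute_wave_distances(net_graph: dict[str, list[str]],
--                            fixed_ids: set[str],
--                            free_ids: set[str]
--                            ) -> tuple[dict[str, int], set[str]]:
--     """BFS from fixed components through the net graph.
--
--     Wave 0 = free components sharing a net with a fixed component.
--     Returns (wave_map, orphans).
--     """
--     # Build adjacency
--     adj: dict[str, set[str]] = defaultdict(set)
--     for _net, addrs in net_graph.items():
--         for a in addrs:
--             for b in addrs: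
--                 if a != b:
--                     adj[a].add(b)
--
--     wave_map: dict[str, int] = {}
--     visited = set(fixed_ids)
--     frontier = set(fixed_ids)
--     wave = 0
--
--     while frontier:
--         next_frontier: set[str] = set()
--         for addr in frontier:
--             for neighbor in adj.get(addr, set()):
--                 if neighbor in visited:
--                     continue
--                 visited.add(neighbor)
--                 if neighbor in free_ids:
--                     wave_map[neighbor] = wave
--                 next_frontier.add(neighbor)
--         frontier = next_frontier
--         wave += 1
--
--     orphans = free_ids - set(wave_map.keys())
--     return wave_map, orphans
-- ===== SOURCE B (Python) =====
-- def compute_wave_distances(net_graph: dict[str, list[str]],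
--                            fixed_ids: set[str],
--                            free_ids: set[str]
--                            ) -> tuple[dict[str, int], set[str]]:
--     """BFS over the bipartite node-net graph.
--
--     A node-to-nets index replaces the all-pairs adjacency (k^2 edges per
--     net of size k): each net is expanded at most once, marked in
--     used_nets.  Wave 0 = free components sharing a net with a fixed
--     component.  Returns (wave_map, orphans).
--     """
--     nets = list(net_graph.values())
--     index: dict[str, list[int]] = {}
--     for i, addrs in enumerate(nets):
--         for a in addrs:
--             index.setdefault(a, []).append(i)
--
--     wave_map: dict[str, int] = {}
--     visited = set(fixed_ids)
--     used_nets: set[int] = set()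
--     frontier = list(visited)
--     wave = 0
--
--     while frontier:
--         fresh: list[str] = []
--         for addr in frontier:
--             for i in index.get(addr, []):
--                 if i not in used_nets:
--                     used_nets.add(i)
--                     for n in nets[i]:
--                         if n not in visited:
--                             visited.add(n)
--                             if n in free_ids:
--                                 wave_map[n] = wave
--                             fresh.append(n)
--         frontier = fresh
--         wave += 1
--
--     return wave_map, free_ids - set(wave_map)
-- ===== Notes on version B (the rewrite author's own statement) =====
-- stated objective: alternative
-- what changed: B runs BFS over the bipartite node-net graph with a node-to-nets index, expanding each net at most once, instead of materialising the all-pairs adjacency (k^2 edges per net of size k) and running BFS over it; intended as faster but not measured >=1.5x at the largest generated size, so speed is not claimed.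
import Mathlib
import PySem

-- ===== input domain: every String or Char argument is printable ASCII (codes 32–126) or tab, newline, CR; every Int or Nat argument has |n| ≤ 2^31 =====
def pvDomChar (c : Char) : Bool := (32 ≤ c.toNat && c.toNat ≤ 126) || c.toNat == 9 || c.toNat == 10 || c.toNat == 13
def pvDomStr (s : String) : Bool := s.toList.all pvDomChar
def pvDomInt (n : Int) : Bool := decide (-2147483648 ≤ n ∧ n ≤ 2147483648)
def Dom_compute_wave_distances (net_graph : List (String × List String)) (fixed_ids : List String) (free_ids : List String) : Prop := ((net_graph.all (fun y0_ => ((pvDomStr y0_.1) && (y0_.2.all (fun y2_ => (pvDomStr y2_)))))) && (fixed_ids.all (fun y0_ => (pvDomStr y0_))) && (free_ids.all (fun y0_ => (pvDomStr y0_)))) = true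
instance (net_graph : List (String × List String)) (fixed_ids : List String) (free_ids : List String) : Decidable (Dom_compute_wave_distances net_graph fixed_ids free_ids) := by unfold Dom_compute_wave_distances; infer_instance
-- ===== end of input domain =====

-- B replaces A's per-net all-pairs adjacency (k^2 edges per net) by BFS over the
-- bipartite node-net graph with a node-to-nets index, expanding each net at most once
-- (objective: alternative).

-- ===== PORT A =====
-- literal transliteration of Source A; each Python loop is a foldl over the same data in the
-- same order; the while loop is structural recursion on a fuel that bounds its iteration
-- count (every iteration except the last strictly grows `visited`, which stays inside
-- fixed_ids ++ all net members, so the fuel is never exhausted — a totality guard only).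
def cwdAdj (net_graph : List (String × List String)) : PySem.Dict String (PySem.Set String) :=
  net_graph.foldl
    (fun adj p =>
      p.2.foldl
        (fun adj a =>
          p.2.foldl
            (fun adj b =>
              if a ≠ b then adj.modify a PySem.Set.empty (fun s => PySem.Set.add s b) else adj)
            adj)
        adj)
    PySem.Dict.empty

def cwdStep (free_ids : List String) (wave : Int)
    (st : PySem.Dict String Int × PySem.Set String × PySem.Set String) (neighbor : String) :
    PySem.Dict String Int × PySem.Set String × PySem.Set String :=
  if PySem.Set.contains st.2.1 neighbor then st
  else
    (if PySem.Set.contains free_ids neighbor then st.1.insert neighbor wave else st.1,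
     PySem.Set.add st.2.1 neighbor,
     PySem.Set.add st.2.2 neighbor)

def cwdLoop (adj : PySem.Dict String (PySem.Set String)) (free_ids : List String) :
    Nat → PySem.Dict String Int → PySem.Set String → PySem.Set String → Int →
    PySem.Dict String Int
  | 0, wave_map, _, _, _ => wave_map
  | fuel + 1, wave_map, visited, frontier, wave =>
    if frontier.isEmpty then wave_map
    else
      let st :=
        frontier.foldl
          (fun st addr => (adj.getD addr PySem.Set.empty).foldl (cwdStep free_ids wave) st)
          (wave_map, visited, PySem.Set.empty)
      cwdLoop adj free_ids fuel st.1 st.2.1 st.2.2 (wave + 1)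

def compute_wave_distances (net_graph : List (String × List String)) (fixed_ids : List String)
    (free_ids : List String) : (List (String × Int)) × List String :=
  let adj := cwdAdj net_graph
  let fuel := net_graph.foldl (fun n p => n + p.2.length) (fixed_ids.length + 1)
  let wave_map :=
    cwdLoop adj free_ids fuel PySem.Dict.empty (PySem.Set.ofList fixed_ids)
      (PySem.Set.ofList fixed_ids) 0
  (wave_map.items, PySem.Set.diff (PySem.Set.ofList free_ids) wave_map.keys)

-- ===== PORT B =====
-- literal transliteration of Source B; each Python loop becomes the obvious structural
-- recursion over the same list with the loop's mutable state as explicit arguments;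
-- the while loop carries the same fuel device as A's port (a totality guard only).

-- the inner `for n in nets[i]` loop
def bVisit (free_ids : List String) (wave : Int) :
    List String → PySem.Dict String Int → PySem.Set String → List String →
    PySem.Dict String Int × PySem.Set String × List String
  | [], wave_map, visited, fresh => (wave_map, visited, fresh)
  | n :: rest, wave_map, visited, fresh =>
    if PySem.Set.contains visited n then bVisit free_ids wave rest wave_map visited fresh
    else
      bVisit free_ids wave rest
        (if PySem.Set.contains free_ids n then wave_map.insert n wave else wave_map)
        (PySem.Set.add visited n) (fresh ++ [n])

-- the `for i in index.get(addr, [])` loop; nets[i] with i a valid index produced by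
-- enumerate, so pyGetD is exact here
def bExpand (nets : List (List String)) (free_ids : List String) (wave : Int) :
    List Int → PySem.Dict String Int → PySem.Set String → PySem.Set Int → List String →
    (PySem.Dict String Int × PySem.Set String × List String) × PySem.Set Int
  | [], wave_map, visited, used, fresh => ((wave_map, visited, fresh), used)
  | i :: rest, wave_map, visited, used, fresh =>
    if PySem.Set.contains used i then
      bExpand nets free_ids wave rest wave_map visited used fresh
    else
      let r := bVisit free_ids wave (PySem.List.pyGetD nets i []) wave_map visited fresh
      bExpand nets free_ids wave rest r.1 r.2.1 (PySem.Set.add used i) r.2.2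

-- the `for addr in frontier` loop
def bSweep (nets : List (List String)) (idx : PySem.Dict String (List Int))
    (free_ids : List String) (wave : Int) :
    List String → PySem.Dict String Int → PySem.Set String → PySem.Set Int → List String →
    (PySem.Dict String Int × PySem.Set String × List String) × PySem.Set Int
  | [], wave_map, visited, used, fresh => ((wave_map, visited, fresh), used)
  | addr :: rest, wave_map, visited, used, fresh =>
    let r := bExpand nets free_ids wave (idx.getD addr []) wave_map visited used fresh
    bSweep nets idx free_ids wave rest r.1.1 r.1.2.1 r.2 r.1.2.2

-- the `while frontier` loop
def bBfs (nets : List (List String)) (idx : PySem.Dict String (List Int))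
    (free_ids : List String) :
    Nat → PySem.Dict String Int → PySem.Set String → PySem.Set Int → List String → Int →
    PySem.Dict String Int
  | 0, wave_map, _, _, _, _ => wave_map
  | fuel + 1, wave_map, visited, used, frontier, wave =>
    if frontier.isEmpty then wave_map
    else
      let r := bSweep nets idx free_ids wave frontier wave_map visited used []
      bBfs nets idx free_ids fuel r.1.1 r.1.2.1 r.2 r.1.2.2 (wave + 1)

-- index building: `for a in addrs: index.setdefault(a, []).append(i)`
def bAddNet (i : Int) : List String → PySem.Dict String (List Int) → PySem.Dict String (List Int)
  | [], d => d
  | a :: rest, d => bAddNet i rest (d.modify a [] (fun l => l ++ [i]))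

-- `for i, addrs in enumerate(nets)`
def bIndex : List (Int × List String) → PySem.Dict String (List Int) → PySem.Dict String (List Int)
  | [], d => d
  | p :: rest, d => bIndex rest (bAddNet p.1 p.2 d)

def compute_wave_distances_alt (net_graph : List (String × List String))
    (fixed_ids : List String) (free_ids : List String) :
    (List (String × Int)) × List String :=
  let nets := net_graph.map (fun p => p.2)
  let idx := bIndex (PySem.List.enumerate nets 0) PySem.Dict.empty
  let fuel := net_graph.foldl (fun n p => n + p.2.length) (fixed_ids.length + 1)
  let wave_map :=
    bBfs nets idx free_ids fuel PySem.Dict.empty (PySem.Set.ofList fixed_ids)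
      PySem.Set.empty (PySem.Set.ofList fixed_ids) 0
  (wave_map.items, PySem.Set.diff (PySem.Set.ofList free_ids) wave_map.keys)

-- ===== PRECONDITION & SPEC =====
def Spec_compute_wave_distances (net_graph : List (String × List String)) (fixed_ids : List String) (free_ids : List String) (out : (List (String × Int)) × List String) : Prop := out = compute_wave_distances_alt net_graph fixed_ids free_ids
instance (net_graph : List (String × List String)) (fixed_ids : List String) (free_ids : List String) (out : (List (String × Int)) × List String) : Decidable (Spec_compute_wave_distances net_graph fixed_ids free_ids out) := by unfold Spec_compute_wave_distances; infer_instance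

-- ===== CLAIM (what is proved, stated in full; the proofs are below) =====
def Claim_equal_compute_wave_distances : Prop := ∀ (net_graph : List (String × List String)) (fixed_ids : List String) (free_ids : List String), Dom_compute_wave_distances net_graph fixed_ids free_ids → Spec_compute_wave_distances net_graph fixed_ids free_ids (compute_wave_distances net_graph fixed_ids free_ids)

-- ===== LEMMAS AND PROOFS =====

-- proof-side foldl reformulations of port B's recursive loops
def cwdStepB (free_ids : List String) (wave : Int)
    (st : PySem.Dict String Int × PySem.Set String × List String) (neighbor : String) :
    PySem.Dict String Int × PySem.Set String × List String :=
  if PySem.Set.contains st.2.1 neighbor then st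
  else
    (if PySem.Set.contains free_ids neighbor then st.1.insert neighbor wave else st.1,
     PySem.Set.add st.2.1 neighbor,
     st.2.2 ++ [neighbor])

def cwdExpand (nets : List (List String)) (free_ids : List String) (wave : Int)
    (st : (PySem.Dict String Int × PySem.Set String × List String) × PySem.Set Int)
    (i : Int) :
    (PySem.Dict String Int × PySem.Set String × List String) × PySem.Set Int :=
  if PySem.Set.contains st.2 i then st
  else
    ((PySem.List.pyGetD nets i []).foldl (cwdStepB free_ids wave) st.1, PySem.Set.add st.2 i)

def cwdIdx (nets : List (List String)) : PySem.Dict String (List Int) :=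
  (PySem.List.enumerate nets 0).foldl
    (fun d p => p.2.foldl (fun d a => d.modify a [] (fun l => l ++ [p.1])) d)
    PySem.Dict.empty

def cwdLoopB (nets : List (List String)) (idx : PySem.Dict String (List Int))
    (free_ids : List String) :
    Nat → PySem.Dict String Int → PySem.Set String → PySem.Set Int → List String → Int →
    PySem.Dict String Int
  | 0, wave_map, _, _, _, _ => wave_map
  | fuel + 1, wave_map, visited, done, frontier, wave =>
    if frontier.isEmpty then wave_map
    else
      let st :=
        frontier.foldl
          (fun st addr => (idx.getD addr []).foldl (cwdExpand nets free_ids wave) st)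
          ((wave_map, visited, ([] : List String)), done)
      cwdLoopB nets idx free_ids fuel st.1.1 st.1.2.1 st.2 st.1.2.2 (wave + 1)

-- bridges: port B's recursive loops equal their foldl reformulations
theorem bVisit_eq (f : List String) (w : Int) (L : List String) :
    ∀ wm vis fresh, bVisit f w L wm vis fresh = L.foldl (cwdStepB f w) (wm, vis, fresh) := by
  induction L with
  | nil => intro wm vis fresh; rfl
  | cons n rest ih =>
    intro wm vis fresh
    simp only [bVisit, List.foldl_cons, cwdStepB]
    split
    · rw [ih]
    · rw [ih]

theorem bExpand_eq (nets : List (List String)) (f : List String) (w : Int) (l : List Int) :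
    ∀ wm vis used fresh,
      bExpand nets f w l wm vis used fresh
        = l.foldl (cwdExpand nets f w) ((wm, vis, fresh), used) := by
  induction l with
  | nil => intro wm vis used fresh; rfl
  | cons i rest ih =>
    intro wm vis used fresh
    simp only [bExpand, List.foldl_cons, cwdExpand]
    split
    · rw [ih]
    · rw [ih, bVisit_eq]

theorem bSweep_eq (nets : List (List String)) (idx : PySem.Dict String (List Int))
    (f : List String) (w : Int) (F : List String) :
    ∀ wm vis used fresh,
      bSweep nets idx f w F wm vis used fresh
        = F.foldl (fun s addr => (idx.getD addr []).foldl (cwdExpand nets f w) s)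
            ((wm, vis, fresh), used) := by
  induction F with
  | nil => intro wm vis used fresh; rfl
  | cons a rest ih =>
    intro wm vis used fresh
    simp only [bSweep, List.foldl_cons, bExpand_eq]
    rw [ih]

theorem bBfs_eq (nets : List (List String)) (idx : PySem.Dict String (List Int))
    (f : List String) (fuel : Nat) :
    ∀ wm vis used F w,
      bBfs nets idx f fuel wm vis used F w = cwdLoopB nets idx f fuel wm vis used F w := by
  induction fuel with
  | zero => intro wm vis used F w; rfl
  | succ n ih =>
    intro wm vis used F w
    simp only [bBfs, cwdLoopB, bSweep_eq]
    split
    · rfl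
    · exact ih _ _ _ _ _

theorem bAddNet_eq (i : Int) (L : List String) :
    ∀ d, bAddNet i L d = L.foldl (fun d a => d.modify a [] (fun l => l ++ [i])) d := by
  induction L with
  | nil => intro d; rfl
  | cons a rest ih => intro d; simp only [bAddNet, List.foldl_cons]; rw [ih]

theorem bIndex_foldl (l : List (Int × List String)) :
    ∀ d, bIndex l d
      = l.foldl (fun d p => p.2.foldl (fun d a => d.modify a [] (fun l2 => l2 ++ [p.1])) d) d := by
  induction l with
  | nil => intro d; rfl
  | cons p rest ih =>
    intro d
    simp only [bIndex, List.foldl_cons, bAddNet_eq]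
    rw [ih]

theorem bIndex_eq (nets : List (List String)) :
    bIndex (PySem.List.enumerate nets 0) PySem.Dict.empty = cwdIdx nets := by
  rw [bIndex_foldl]
  rfl

-- the common per-node reference expansion: process every net containing `addr` once
def cwdRef (free_ids : List String) (wave : Int) (nets : List (List String))
    (st : PySem.Dict String Int × PySem.Set String × List String) (addr : String) :
    PySem.Dict String Int × PySem.Set String × List String :=
  nets.foldl (fun st mem => if addr ∈ mem then mem.foldl (cwdStepB free_ids wave) st else st) st

-- invariant: every id in next_frontier is visited
def cwdInvA (st : PySem.Dict String Int × PySem.Set String × List String) : Prop :=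
  ∀ y ∈ st.2.2, y ∈ st.2.1

-- invariant: every member of an expanded net is visited
def cwdInvD (nets : List (List String)) (done : PySem.Set Int) (vis : PySem.Set String) : Prop :=
  ∀ i ∈ done, ∀ x ∈ PySem.List.pyGetD nets i [], x ∈ vis

theorem cwd_step_visited (f : List String) (w : Int) (st) (x : String) (h : x ∈ st.2.1) :
    cwdStepB f w st x = st := by
  simp [cwdStepB, PySem.Set.contains, h]

theorem cwd_step_vis_mono (f : List String) (w : Int) (st) (x y : String) (h : y ∈ st.2.1) :
    y ∈ (cwdStepB f w st x).2.1 := by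
  unfold cwdStepB
  split
  · exact h
  · exact (PySem.Set.mem_add _ _ _).2 (Or.inl h)

theorem cwd_step_self_vis (f : List String) (w : Int) (st) (x : String) :
    x ∈ (cwdStepB f w st x).2.1 := by
  unfold cwdStepB
  split
  · next hc => simpa [PySem.Set.contains] using hc
  · exact (PySem.Set.mem_add _ _ _).2 (Or.inr rfl)

theorem cwd_fold_vis_mono (f : List String) (w : Int) (L : List String) :
    ∀ st (y : String), y ∈ st.2.1 → y ∈ (L.foldl (cwdStepB f w) st).2.1 := by
  induction L with
  | nil => intro st y h; exact h
  | cons a t ih =>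
    intro st y h
    exact ih _ y (cwd_step_vis_mono f w st a y h)

theorem cwd_fold_vis_all (f : List String) (w : Int) (L : List String) :
    ∀ st (x : String), x ∈ L → x ∈ (L.foldl (cwdStepB f w) st).2.1 := by
  induction L with
  | nil => intro st x h; cases h
  | cons a t ih =>
    intro st x h
    rcases List.mem_cons.1 h with h | h
    · subst h
      exact cwd_fold_vis_mono f w t _ x (cwd_step_self_vis f w st x)
    · exact ih _ x h

theorem cwd_fold_noop (f : List String) (w : Int) (L : List String) :
    ∀ st, (∀ x ∈ L, x ∈ st.2.1) → L.foldl (cwdStepB f w) st = st := by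
  induction L with
  | nil => intro st _; rfl
  | cons a t ih =>
    intro st h
    have ha : cwdStepB f w st a = st := cwd_step_visited f w st a (h a (by simp))
    simp only [List.foldl_cons, ha]
    exact ih st (fun x hx => h x (by simp [hx]))

theorem cwd_fold_filter (f : List String) (w : Int) (p : String → Bool) (L : List String) :
    ∀ st, (∀ x ∈ L, p x = false → x ∈ st.2.1) →
      (L.filter p).foldl (cwdStepB f w) st = L.foldl (cwdStepB f w) st := by
  induction L with
  | nil => intro st _; rfl
  | cons a t ih =>
    intro st h
    by_cases hp : p a = true
    · simp only [List.filter_cons_of_pos hp, List.foldl_cons]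
      exact ih _ (fun x hx hfx => cwd_step_vis_mono f w st a x (h x (by simp [hx]) hfx))
    · have hf : p a = false := by simpa using hp
      have ha : cwdStepB f w st a = st :=
        cwd_step_visited f w st a (h a (by simp) hf)
      simp only [List.filter_cons, hf, Bool.false_eq_true, if_false, List.foldl_cons, ha]
      exact ih _ (fun x hx hfx => h x (by simp [hx]) hfx)

theorem cwd_fold_add (f : List String) (w : Int) (s : PySem.Set String) (x : String) :
    ∀ st, (PySem.Set.add s x).foldl (cwdStepB f w) st = cwdStepB f w (s.foldl (cwdStepB f w) st) x := by
  intro st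
  by_cases hx : x ∈ s
  · have : PySem.Set.add s x = s := by simp [PySem.Set.add, PySem.Set.contains, hx]
    rw [this, cwd_step_visited f w _ x (cwd_fold_vis_all f w s st x hx)]
  · have : PySem.Set.add s x = s ++ [x] := by simp [PySem.Set.add, PySem.Set.contains, hx]
    rw [this, List.foldl_append]
    rfl

theorem cwd_fold_ofList (f : List String) (w : Int) (L : List String) :
    ∀ st, (PySem.Set.ofList L).foldl (cwdStepB f w) st = L.foldl (cwdStepB f w) st := by
  intro st
  have aux : ∀ (L : List String) (s : PySem.Set String) st,
      (L.foldl PySem.Set.add s).foldl (cwdStepB f w) st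
        = L.foldl (cwdStepB f w) (s.foldl (cwdStepB f w) st) := by
    intro L
    induction L with
    | nil => intro s st; rfl
    | cons a t ih =>
      intro s st
      simp only [List.foldl_cons]
      rw [ih (PySem.Set.add s a) st, cwd_fold_add f w s a st]
  rw [PySem.Set.ofList_eq_foldl, aux L [] st]
  rfl

theorem cwd_foldl_inv_congr {σ α : Type} {Inv : σ → Prop} {fn g : σ → α → σ}
    (h : ∀ s x, Inv s → fn s x = g s x ∧ Inv (g s x)) :
    ∀ (L : List α) (s : σ), Inv s → L.foldl fn s = L.foldl g s ∧ Inv (L.foldl g s) := by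
  intro L
  induction L with
  | nil => intro s hs; exact ⟨rfl, hs⟩
  | cons a t ih =>
    intro s hs
    obtain ⟨heq, hinv⟩ := h s a hs
    obtain ⟨ht, hti⟩ := ih (g s a) hinv
    exact ⟨by simp only [List.foldl_cons, heq, ht], by simpa using hti⟩

theorem cwd_stepA_eq (f : List String) (w : Int) (st) (x : String) (h : cwdInvA st) :
    cwdStep f w st x = cwdStepB f w st x ∧ cwdInvA (cwdStepB f w st x) := by
  unfold cwdStep cwdStepB
  split
  · next hc =>
    refine ⟨rfl, ?_⟩
    simpa [cwdStepB, PySem.Set.contains, hc] using h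
  · next hc =>
    have hxv : x ∉ st.2.1 := by
      intro hm
      exact hc (by simpa [PySem.Set.contains] using hm)
    have hxn : x ∉ st.2.2 := fun hm => hxv (h x hm)
    refine ⟨by simp [PySem.Set.add, PySem.Set.contains, hxn], ?_⟩
    intro y hy
    rcases List.mem_append.1 hy with hy | hy
    · exact (PySem.Set.mem_add _ _ _).2 (Or.inl (h y hy))
    · simp only [List.mem_singleton] at hy
      subst hy
      exact (PySem.Set.mem_add _ _ _).2 (Or.inr rfl)

-- closed form of A's adjacency lists
def cwdNbrs (net_graph : List (String × List String)) (x : String) : List String :=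
  net_graph.flatMap (fun p =>
    p.2.flatMap (fun a => if a = x then p.2.filter (fun b => !(a == b)) else []))

theorem cwd_getD_adj (net_graph : List (String × List String)) (x : String) :
    (cwdAdj net_graph).getD x PySem.Set.empty = PySem.Set.ofList (cwdNbrs net_graph x) := by
  have inner_ne : ∀ (a : String), a ≠ x → ∀ (addrs : List String) (d : PySem.Dict String (PySem.Set String)),
      (addrs.foldl (fun adj b =>
          if a ≠ b then adj.modify a PySem.Set.empty (fun s => PySem.Set.add s b) else adj) d).getD x PySem.Set.empty
        = d.getD x PySem.Set.empty := by
    intro a ha addrs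
    induction addrs with
    | nil => intro d; rfl
    | cons b t ih =>
      intro d
      simp only [List.foldl_cons]
      by_cases hab : a = b
      · subst hab
        simp only [ne_eq, not_true_eq_false, if_false]
        exact ih d
      · simp only [ne_eq, hab, not_false_eq_true, if_pos]
        rw [ih, PySem.Dict.getD_modify]
        simp [Ne.symm ha]
  have inner_eq : ∀ (addrs : List String) (d : PySem.Dict String (PySem.Set String)),
      (addrs.foldl (fun adj b =>
          if x ≠ b then adj.modify x PySem.Set.empty (fun s => PySem.Set.add s b) else adj) d).getD x PySem.Set.empty
        = PySem.Set.update (d.getD x PySem.Set.empty) (addrs.filter (fun b => !(x == b))) := by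
    intro addrs
    induction addrs with
    | nil => intro d; simp [PySem.Set.update]
    | cons b t ih =>
      intro d
      by_cases hxb : x = b
      · subst hxb
        simp only [List.foldl_cons, ne_eq, not_true_eq_false, List.filter_cons,
          beq_self_eq_true, Bool.not_true, Bool.false_eq_true, if_false]
        exact ih d
      · simp only [List.foldl_cons, ne_eq, hxb, not_false_eq_true, if_pos, List.filter_cons]
        rw [ih, PySem.Dict.getD_modify_self]
        simp [PySem.Set.update, hxb]
  have mid : ∀ (addrs addrs0 : List String) (d : PySem.Dict String (PySem.Set String)),
      (addrs.foldl (fun adj a => addrs0.foldl (fun adj b =>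
          if a ≠ b then adj.modify a PySem.Set.empty (fun s => PySem.Set.add s b) else adj) adj) d).getD x PySem.Set.empty
        = PySem.Set.update (d.getD x PySem.Set.empty)
            (addrs.flatMap (fun a => if a = x then addrs0.filter (fun b => !(a == b)) else [])) := by
    intro addrs addrs0
    induction addrs with
    | nil => intro d; simp [PySem.Set.update]
    | cons a t ih =>
      intro d
      simp only [List.foldl_cons, List.flatMap_cons]
      by_cases hax : a = x
      · subst hax
        rw [ih, inner_eq, if_pos rfl]
        simp [PySem.Set.update, List.foldl_append]
      · rw [ih, inner_ne a hax, if_neg hax]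
        simp
  have outer : ∀ (ng : List (String × List String)) (d : PySem.Dict String (PySem.Set String)),
      (ng.foldl (fun adj p => p.2.foldl (fun adj a => p.2.foldl (fun adj b =>
          if a ≠ b then adj.modify a PySem.Set.empty (fun s => PySem.Set.add s b) else adj) adj) adj) d).getD x PySem.Set.empty
        = PySem.Set.update (d.getD x PySem.Set.empty) (cwdNbrs ng x) := by
    intro ng
    induction ng with
    | nil => intro d; simp [cwdNbrs, PySem.Set.update]
    | cons p t ih =>
      intro d
      simp only [List.foldl_cons, cwdNbrs, List.flatMap_cons]
      rw [ih, mid]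
      simp [cwdNbrs, PySem.Set.update, List.foldl_append]
  show (cwdAdj net_graph).getD x PySem.Set.empty = _
  unfold cwdAdj
  rw [outer]
  simp [PySem.Set.update, PySem.Set.ofList_eq_foldl]

-- closed form of B's node-to-nets index
def cwdIdxList (nets : List (List String)) (x : String) : List Int :=
  (PySem.List.enumerate nets 0).flatMap (fun p =>
    p.2.flatMap (fun a => if a = x then [p.1] else []))

theorem cwd_getD_idx (nets : List (List String)) (x : String) :
    (cwdIdx nets).getD x [] = cwdIdxList nets x := by
  have inner : ∀ (i : Int) (addrs : List String) (d : PySem.Dict String (List Int)),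
      (addrs.foldl (fun d a => d.modify a [] (fun l => l ++ [i])) d).getD x []
        = d.getD x [] ++ addrs.flatMap (fun a => if a = x then [i] else []) := by
    intro i addrs
    induction addrs with
    | nil => intro d; simp
    | cons a t ih =>
      intro d
      simp only [List.foldl_cons, List.flatMap_cons]
      rw [ih, PySem.Dict.getD_modify]
      by_cases hax : x = a
      · subst hax; simp
      · rw [if_neg hax, if_neg (fun h => hax h.symm)]
        simp
  have outer : ∀ (l : List (Int × List String)) (d : PySem.Dict String (List Int)),
      (l.foldl (fun d p => p.2.foldl (fun d a => d.modify a [] (fun l2 => l2 ++ [p.1])) d) d).getD x []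
        = d.getD x [] ++ l.flatMap (fun p => p.2.flatMap (fun a => if a = x then [p.1] else [])) := by
    intro l
    induction l with
    | nil => intro d; simp
    | cons p t ih =>
      intro d
      simp only [List.foldl_cons, List.flatMap_cons]
      rw [ih, inner]
      simp
  unfold cwdIdx cwdIdxList
  rw [outer]
  simp

theorem cwd_foldl_flatMap {α β σ : Type} (g : α → List β) (fn : σ → β → σ) (l : List α) :
    ∀ s, (l.flatMap g).foldl fn s = l.foldl (fun s x => (g x).foldl fn s) s := by
  induction l with
  | nil => intro s; rfl
  | cons a t ih =>
    intro s
    simp only [List.flatMap_cons, List.foldl_append, List.foldl_cons]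
    exact ih _

theorem cwd_ref_vis_mono (f : List String) (w : Int) (nets : List (List String)) (addr y : String) :
    ∀ st, y ∈ st.2.1 → y ∈ (cwdRef f w nets st addr).2.1 := by
  induction nets with
  | nil => intro st h; exact h
  | cons mem t ih =>
    intro st h
    unfold cwdRef
    simp only [List.foldl_cons]
    apply ih
    split
    · exact cwd_fold_vis_mono f w mem st y h
    · exact h

theorem cwd_occFold_noop (f : List String) (w : Int) (addr : String) (c : List String) :
    ∀ (l : List String) st, (∀ x ∈ c, x ∈ st.2.1) →
      l.foldl (fun st a => if a = addr then c.foldl (cwdStepB f w) st else st) st = st := by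
  intro l
  induction l with
  | nil => intro st _; rfl
  | cons a t ih =>
    intro st h
    simp only [List.foldl_cons]
    by_cases ha : a = addr
    · rw [if_pos ha, cwd_fold_noop f w c st h]
      exact ih st h
    · rw [if_neg ha]
      exact ih st h

theorem cwd_occFold (f : List String) (w : Int) (addr : String) (c : List String) :
    ∀ (l : List String) st,
      l.foldl (fun st a => if a = addr then c.foldl (cwdStepB f w) st else st) st
        = if addr ∈ l then c.foldl (cwdStepB f w) st else st := by
  intro l
  induction l with
  | nil => intro st; simp
  | cons a t ih =>
    intro st
    simp only [List.foldl_cons, List.mem_cons]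
    by_cases ha : a = addr
    · rw [if_pos ha, if_pos (Or.inl ha.symm)]
      rw [cwd_occFold_noop f w addr c t _ (fun x hx => cwd_fold_vis_all f w c st x hx)]
    · rw [if_neg ha, ih st]
      by_cases hmem : addr ∈ t
      · rw [if_pos hmem, if_pos (Or.inr hmem)]
      · rw [if_neg hmem, if_neg (by rintro (h | h); exact ha h.symm; exact hmem h)]

theorem cwd_fold_invA (f : List String) (w : Int) (L : List String) :
    ∀ st, cwdInvA st → cwdInvA (L.foldl (cwdStepB f w) st) := by
  induction L with
  | nil => intro st h; exact h
  | cons a t ih =>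
    intro st h
    exact ih _ (cwd_stepA_eq f w st a h).2

theorem cwd_nodeA (ng : List (String × List String)) (f : List String) (w : Int)
    (addr : String) :
    ∀ st, addr ∈ st.2.1 → cwdInvA st →
      ((cwdAdj ng).getD addr PySem.Set.empty).foldl (cwdStep f w) st
        = cwdRef f w (ng.map (fun p => p.2)) st addr
      ∧ cwdInvA (cwdRef f w (ng.map (fun p => p.2)) st addr) := by
  intro st haddr hInv
  have hmap : cwdRef f w (ng.map (fun p => p.2)) st addr
      = ng.foldl (fun st p => if addr ∈ p.2 then p.2.foldl (cwdStepB f w) st else st) st := by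
    unfold cwdRef
    rw [List.foldl_map]
  have hstep : ((cwdAdj ng).getD addr PySem.Set.empty).foldl (cwdStep f w) st
      = ((cwdAdj ng).getD addr PySem.Set.empty).foldl (cwdStepB f w) st :=
    (cwd_foldl_inv_congr (Inv := cwdInvA) (fn := cwdStep f w) (g := cwdStepB f w)
      (fun s x hs => cwd_stepA_eq f w s x hs) _ st hInv).1
  rw [hstep, cwd_getD_adj, cwd_fold_ofList]
  unfold cwdNbrs
  rw [cwd_foldl_flatMap]
  have hpt : ∀ (s : PySem.Dict String Int × PySem.Set String × List String)
      (p : String × List String), addr ∈ s.2.1 →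
      (p.2.flatMap (fun a => if a = addr then p.2.filter (fun b => !(a == b)) else [])).foldl
          (cwdStepB f w) s
        = (if addr ∈ p.2 then p.2.foldl (cwdStepB f w) s else s)
      ∧ addr ∈ (if addr ∈ p.2 then p.2.foldl (cwdStepB f w) s else s).2.1 := by
    intro s p hs
    constructor
    · rw [cwd_foldl_flatMap]
      have hcong : p.2.foldl
            (fun s a => (if a = addr then p.2.filter (fun b => !(a == b)) else []).foldl
              (cwdStepB f w) s) s
          = p.2.foldl
            (fun s a => if a = addr then (p.2.filter (fun b => !(addr == b))).foldl
              (cwdStepB f w) s else s) s := by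
        apply PySem.List.foldl_congr_mem
        intro acc x _
        by_cases hx : x = addr
        · subst hx; simp
        · simp [hx]
      rw [hcong, cwd_occFold]
      split
      · exact cwd_fold_filter f w _ p.2 s
          (fun x _ hfx => by
            have hxa : addr = x := by simpa using hfx
            exact hxa ▸ hs)
      · rfl
    · split
      · exact cwd_fold_vis_mono f w p.2 s addr hs
      · exact hs
  have main : ∀ (l : List (String × List String)) s, addr ∈ s.2.1 → cwdInvA s →
      l.foldl (fun s x => (x.2.flatMap
          (fun a => if a = addr then x.2.filter (fun b => !(a == b)) else [])).foldl
            (cwdStepB f w) s) s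
        = l.foldl (fun s x => if addr ∈ x.2 then x.2.foldl (cwdStepB f w) s else s) s
      ∧ addr ∈ (l.foldl (fun s x => if addr ∈ x.2 then x.2.foldl (cwdStepB f w) s else s) s).2.1
      ∧ cwdInvA (l.foldl (fun s x => if addr ∈ x.2 then x.2.foldl (cwdStepB f w) s else s) s) := by
    intro l
    induction l with
    | nil => intro s hs hsi; exact ⟨rfl, hs, hsi⟩
    | cons p t ih =>
      intro s hs hsi
      obtain ⟨h1, h2⟩ := hpt s p hs
      have hsi' : cwdInvA (if addr ∈ p.2 then p.2.foldl (cwdStepB f w) s else s) := by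
        split
        · exact cwd_fold_invA f w p.2 s hsi
        · exact hsi
      obtain ⟨h3, h4, h5⟩ := ih _ h2 hsi'
      refine ⟨?_, by simpa using h4, by simpa using h5⟩
      simp only [List.foldl_cons, h1, h3]
  obtain ⟨h1, _, h3⟩ := main ng st haddr hInv
  rw [hmap]
  exact ⟨h1, h3⟩

theorem cwd_expandBlock (nets : List (List String)) (f : List String) (w : Int)
    (addr : String) (i : Int) (mem : List String)
    (hmem : PySem.List.pyGetD nets i [] = mem) :
    ∀ (occs : List String) st (done : PySem.Set Int), cwdInvD nets done st.2.1 →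
      ∃ done', (occs.flatMap (fun a => if a = addr then [i] else [])).foldl
            (cwdExpand nets f w) (st, done)
          = ((if addr ∈ occs then mem.foldl (cwdStepB f w) st else st), done')
        ∧ cwdInvD nets done'
            (if addr ∈ occs then mem.foldl (cwdStepB f w) st else st).2.1 := by
  intro occs
  induction occs with
  | nil =>
    intro st done hd
    exact ⟨done, by simp, by simpa using hd⟩
  | cons a t ih =>
    intro st done hd
    by_cases ha : a = addr
    · subst ha
      simp only [List.flatMap_cons, List.mem_cons, true_or, if_pos,
        List.singleton_append, List.foldl_cons]
      by_cases hid : i ∈ done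
      · have hskip : cwdExpand nets f w (st, done) i = (st, done) := by
          simp [cwdExpand, PySem.Set.contains, hid]
        have hvis : ∀ x ∈ mem, x ∈ st.2.1 := fun x hx => hd i hid x (hmem ▸ hx)
        have hnoop : mem.foldl (cwdStepB f w) st = st := cwd_fold_noop f w mem st hvis
        rw [hskip]
        obtain ⟨done', heq, hinv⟩ := ih st done hd
        refine ⟨done', ?_, ?_⟩
        · rw [heq, hnoop]
          split <;> rfl
        · rw [hnoop]
          split at hinv
          · simpa [hnoop] using hinv
          · simpa using hinv
      · have hexp : cwdExpand nets f w (st, done) i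
            = (mem.foldl (cwdStepB f w) st, PySem.Set.add done i) := by
          simp [cwdExpand, PySem.Set.contains, hid, hmem]
        have hd' : cwdInvD nets (PySem.Set.add done i) (mem.foldl (cwdStepB f w) st).2.1 := by
          intro j hj x hx
          rcases (PySem.Set.mem_add done i j).1 hj with hj | hj
          · exact cwd_fold_vis_mono f w mem st x (hd j hj x hx)
          · subst hj
            rw [hmem] at hx
            exact cwd_fold_vis_all f w mem st x hx
        rw [hexp]
        obtain ⟨done', heq, hinv⟩ := ih (mem.foldl (cwdStepB f w) st) (PySem.Set.add done i) hd'
        have hnoop : mem.foldl (cwdStepB f w) (mem.foldl (cwdStepB f w) st)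
            = mem.foldl (cwdStepB f w) st :=
          cwd_fold_noop f w mem _ (fun x hx => cwd_fold_vis_all f w mem st x hx)
        refine ⟨done', ?_, ?_⟩
        · rw [heq, hnoop]
          split <;> rfl
        · rw [hnoop] at hinv
          split at hinv
          · exact hinv
          · exact hinv
    · simp only [List.flatMap_cons, if_neg ha, List.nil_append]
      obtain ⟨done', heq, hinv⟩ := ih st done hd
      have ha' : addr ≠ a := fun h => ha h.symm
      refine ⟨done', ?_, ?_⟩
      · rw [heq]
        simp [List.mem_cons, ha']
      · simpa [List.mem_cons, ha'] using hinv

theorem cwd_nodeB (nets : List (List String)) (f : List String) (w : Int) (addr : String) :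
    ∀ st (done : PySem.Set Int), addr ∈ st.2.1 → cwdInvD nets done st.2.1 →
      ∃ done', (cwdIdxList nets addr).foldl (cwdExpand nets f w) (st, done)
          = (cwdRef f w nets st addr, done')
        ∧ cwdInvD nets done' (cwdRef f w nets st addr).2.1 := by
  have hval : ∀ p ∈ PySem.List.enumerate nets 0, PySem.List.pyGetD nets p.1 [] = p.2 := by
    intro p hp
    rw [PySem.List.mem_enumerate_iff] at hp
    obtain ⟨k, hk, hpk⟩ := hp
    subst hpk
    simp [PySem.List.pyGetD_natCast, List.getD_eq_getElem?_getD, hk]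
  have href : ∀ st, cwdRef f w nets st addr
      = (PySem.List.enumerate nets 0).foldl
          (fun st p => if addr ∈ p.2 then p.2.foldl (cwdStepB f w) st else st) st := by
    intro st
    conv_lhs => rw [cwdRef, ← PySem.List.map_snd_enumerate nets 0, List.foldl_map]
  have main : ∀ (l : List (Int × List String)) st (done : PySem.Set Int),
      (∀ p ∈ l, PySem.List.pyGetD nets p.1 [] = p.2) → cwdInvD nets done st.2.1 →
      ∃ done', (l.flatMap (fun p => p.2.flatMap (fun a => if a = addr then [p.1] else []))).foldl
            (cwdExpand nets f w) (st, done)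
          = (l.foldl (fun st p => if addr ∈ p.2 then p.2.foldl (cwdStepB f w) st else st) st, done')
        ∧ cwdInvD nets done'
            (l.foldl (fun st p => if addr ∈ p.2 then p.2.foldl (cwdStepB f w) st else st) st).2.1 := by
    intro l
    induction l with
    | nil =>
      intro st done _ hd
      exact ⟨done, rfl, hd⟩
    | cons p t ih =>
      intro st done hv hd
      simp only [List.flatMap_cons, List.foldl_append, List.foldl_cons]
      obtain ⟨done1, heq1, hinv1⟩ :=
        cwd_expandBlock nets f w addr p.1 p.2 (hv p (by simp)) p.2 st done hd
      rw [heq1]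
      obtain ⟨done', heq2, hinv2⟩ :=
        ih _ done1 (fun q hq => hv q (by simp [hq])) hinv1
      exact ⟨done', heq2, hinv2⟩
  intro st done _ hd
  obtain ⟨done', heq, hinv⟩ := main (PySem.List.enumerate nets 0) st done hval hd
  refine ⟨done', ?_, ?_⟩
  · rw [cwdIdxList, heq, href]
  · rw [href]
    exact hinv

theorem cwd_waveEq (ng : List (String × List String)) (f : List String) (w : Int) :
    ∀ (F : List String) st (done : PySem.Set Int),
      (∀ a ∈ F, a ∈ st.2.1) → cwdInvA st → cwdInvD (ng.map (fun p => p.2)) done st.2.1 →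
      ∃ st' done',
        F.foldl (fun st addr =>
            ((cwdAdj ng).getD addr PySem.Set.empty).foldl (cwdStep f w) st) st = st'
        ∧ F.foldl (fun s addr =>
            ((cwdIdx (ng.map (fun p => p.2))).getD addr []).foldl
              (cwdExpand (ng.map (fun p => p.2)) f w) s) (st, done) = (st', done')
        ∧ cwdInvA st'
        ∧ cwdInvD (ng.map (fun p => p.2)) done' st'.2.1
        ∧ (∀ y ∈ st.2.1, y ∈ st'.2.1) := by
  intro F
  induction F with
  | nil =>
    intro st done hF hA hD
    exact ⟨st, done, rfl, rfl, hA, hD, fun y hy => hy⟩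
  | cons a t ih =>
    intro st done hF hA hD
    have haddr : a ∈ st.2.1 := hF a (by simp)
    obtain ⟨heqA, hInvA'⟩ := cwd_nodeA ng f w a st haddr hA
    obtain ⟨done1, heqB, hInvD1⟩ :=
      cwd_nodeB (ng.map (fun p => p.2)) f w a st done haddr hD
    have hmono1 : ∀ y ∈ st.2.1, y ∈ (cwdRef f w (ng.map (fun p => p.2)) st a).2.1 :=
      fun y hy => cwd_ref_vis_mono f w (ng.map (fun p => p.2)) a y st hy
    obtain ⟨st', done', h1, h2, h3, h4, h5⟩ :=
      ih (cwdRef f w (ng.map (fun p => p.2)) st a) done1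
        (fun x hx => hmono1 x (hF x (by simp [hx]))) hInvA' hInvD1
    refine ⟨st', done', ?_, ?_, h3, h4, fun y hy => h5 y (hmono1 y hy)⟩
    · simpa only [List.foldl_cons, heqA] using h1
    · have hhead : ((cwdIdx (ng.map (fun p => p.2))).getD a []).foldl
            (cwdExpand (ng.map (fun p => p.2)) f w) (st, done)
          = (cwdRef f w (ng.map (fun p => p.2)) st a, done1) := by
        rw [cwd_getD_idx]
        exact heqB
      simp only [List.foldl_cons, hhead]
      exact h2

theorem cwd_loopEq (ng : List (String × List String)) (f : List String) :
    ∀ (fuel : Nat) (wm : PySem.Dict String Int) (vis : PySem.Set String)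
      (done : PySem.Set Int) (F : List String) (w : Int),
      (∀ a ∈ F, a ∈ vis) → cwdInvD (ng.map (fun p => p.2)) done vis →
      cwdLoop (cwdAdj ng) f fuel wm vis F w
        = cwdLoopB (ng.map (fun p => p.2)) (cwdIdx (ng.map (fun p => p.2))) f fuel wm vis done F w := by
  intro fuel
  induction fuel with
  | zero => intro wm vis done F w _ _; rfl
  | succ n ih =>
    intro wm vis done F w hF hD
    simp only [cwdLoop, cwdLoopB]
    by_cases hE : F.isEmpty
    · rw [if_pos hE, if_pos hE]
    · rw [if_neg hE, if_neg hE]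
      obtain ⟨st', done', hA, hB, hInvA', hInvD', _⟩ :=
        cwd_waveEq ng f w F (wm, vis, PySem.Set.empty) done hF
          (fun y hy => absurd hy (by simp [PySem.Set.empty])) hD
      rw [hA]
      have hB' : F.foldl (fun s addr =>
          ((cwdIdx (ng.map (fun p => p.2))).getD addr []).foldl
            (cwdExpand (ng.map (fun p => p.2)) f w) s)
          (((wm, vis, ([] : List String))), done) = (st', done') := hB
      rw [hB']
      exact ih st'.1 st'.2.1 done' st'.2.2 (w + 1) (fun y hy => hInvA' y hy) hInvD'

-- ===== VERDICT (by name: the statement is the Claim_ definition above) =====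
theorem compute_wave_distances_spec : Claim_equal_compute_wave_distances := by
  intro ng fixed free _
  unfold Spec_compute_wave_distances compute_wave_distances compute_wave_distances_alt
  simp only [bIndex_eq, bBfs_eq]
  have h := cwd_loopEq ng free
    (ng.foldl (fun n p => n + p.2.length) (fixed.length + 1))
    PySem.Dict.empty (PySem.Set.ofList fixed) PySem.Set.empty (PySem.Set.ofList fixed) 0
    (fun a ha => ha) (by intro i hi; cases hi)
  simp only [h]
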